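-- pv_equiv track=rewrite | github.com/posl/comment_recommendation | script/split_gen/3_time/en/121_D/2.py | f
-- ===== SOURCE A (Python) =====
-- def f(A, B):
--     if A == B:
--         return A
--     elif A % 2 == 0 and B % 2 == 1:
--         return 1
--     elif A % 2 == 1 and B % 2 == 0:
--         return 0
--     else:
--         return f(A//2, B//2)
-- ===== SOURCE B (Python) =====
-- def f(A, B):
--     if A == B:
--         return A
--     d = A - B
--     k = 0
--     while d % 2 == 0:
--         d //= 2
--         k += 1
--     return (B // 2**k) % 2
-- ===== Notes on version B (the rewrite author's own statement) =====
-- stated objective: alternative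
-- what changed: Instead of halving A and B jointly until their parities differ, B computes the 2-adic valuation k of the single difference A-B and returns bit k of B directly.
import Mathlib
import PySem

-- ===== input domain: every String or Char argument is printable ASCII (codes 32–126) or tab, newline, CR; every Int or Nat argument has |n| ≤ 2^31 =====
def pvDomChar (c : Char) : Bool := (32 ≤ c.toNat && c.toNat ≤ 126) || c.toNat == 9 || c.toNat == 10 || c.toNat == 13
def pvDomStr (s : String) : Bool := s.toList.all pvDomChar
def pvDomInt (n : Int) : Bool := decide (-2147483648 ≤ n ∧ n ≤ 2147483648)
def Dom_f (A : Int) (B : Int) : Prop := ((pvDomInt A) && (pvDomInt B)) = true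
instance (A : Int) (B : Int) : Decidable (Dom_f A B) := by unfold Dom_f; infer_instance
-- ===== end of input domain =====

-- B replaces the joint halving of A and B by computing the 2-adic valuation k of the single
-- difference A-B and returning bit k of B (alternative decomposition; same value on all integers).
-- Both recursions are written with a Nat fuel that provably suffices (pvG A + pvG B strictly
-- decreases at each recursive call), purely as a totality guard; the fuel branch is never taken.

-- pvG x = number of halvings of x until it reaches its fixed point (0 or -1); the fuel bound
def pvG (x : Int) : Nat := (if 0 ≤ x then x else -(x+1)).toNat

-- ===== PORT A =====
def fGo : Nat → Int → Int → Int
  | 0, _, _ => 0   -- fuel exhausted: unreachable for the fuel f supplies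
  | n+1, A, B =>
    if A = B then A
    else if PySem.Int.mod A 2 = 0 ∧ PySem.Int.mod B 2 = 1 then 1
    else if PySem.Int.mod A 2 = 1 ∧ PySem.Int.mod B 2 = 0 then 0
    else fGo n (PySem.Int.floordiv A 2) (PySem.Int.floordiv B 2)

def f (A : Int) (B : Int) : Int := fGo (pvG A + pvG B + 1) A B

-- ===== PORT B =====
-- the while loop of Source B: number of factors 2 in d (d = 0 never occurs in f_alt's use)
def pvTZGo : Nat → Int → Nat
  | 0, _ => 0      -- fuel exhausted: unreachable for the fuel pvTZ supplies
  | n+1, d =>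
    if d = 0 then 0
    else if PySem.Int.mod d 2 = 0 then pvTZGo n (PySem.Int.floordiv d 2) + 1
    else 0

def pvTZ (d : Int) : Nat := pvTZGo (pvG d + 1) d

def f_alt (A : Int) (B : Int) : Int :=
  if A = B then A
  else PySem.Int.mod (PySem.Int.floordiv B (2 ^ pvTZ (A - B))) 2

-- ===== PRECONDITION & SPEC =====
def Spec_f (A : Int) (B : Int) (out : Int) : Prop := out = f_alt A B
instance (A : Int) (B : Int) (out : Int) : Decidable (Spec_f A B out) := by unfold Spec_f; infer_instance

-- ===== CLAIM (what is proved, stated in full; the proofs are below) =====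
def Claim_equal_f : Prop := ∀ (A : Int) (B : Int), Dom_f A B → Spec_f A B (f A B)

-- ===== LEMMAS AND PROOFS =====
theorem pv_m2 (x : Int) : PySem.Int.mod x 2 = x % 2 :=
  PySem.Int.mod_eq_emod_of_pos (by norm_num)

theorem pv_d (x y : Int) (h : 0 < y) : PySem.Int.floordiv x y = x / y :=
  PySem.Int.floordiv_eq_ediv_of_pos h

theorem pvG_half (d : Int) (h0 : d ≠ 0) (he : d % 2 = 0) : pvG (d / 2) < pvG d := by
  simp only [pvG]; split_ifs <;> omega

-- pvTZGo is fuel-insensitive once the fuel exceeds pvG d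
theorem pvTZGo_congr (m : Nat) : ∀ (n : Nat) (d : Int), pvG d < m → pvG d < n →
    pvTZGo m d = pvTZGo n d := by
  induction m with
  | zero => intro n d hm hn; omega
  | succ m ih =>
      intro n d hm hn
      cases n with
      | zero => omega
      | succ n =>
          simp only [pvTZGo, pv_m2, pv_d _ _ (by norm_num : (0:Int) < 2)]
          by_cases h0 : d = 0
          · simp [h0]
          · simp only [h0, if_false]
            by_cases he : d % 2 = 0
            · have hlt := pvG_half d h0 he
              simp [he, ih n (d / 2) (by omega) (by omega)]
            · simp [he]

theorem pvTZ_odd (d : Int) (h : d % 2 = 1) : pvTZ d = 0 := by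
  unfold pvTZ
  simp only [pvTZGo, pv_m2]
  have h0 : d ≠ 0 := by omega
  simp [h0, h]

theorem pvTZ_even (d : Int) (h0 : d ≠ 0) (h : d % 2 = 0) :
    pvTZ d = pvTZ (d / 2) + 1 := by
  unfold pvTZ
  have hlt := pvG_half d h0 h
  conv_lhs => rw [pvTZGo]
  simp only [h0, if_false, pv_m2, pv_d _ _ (by norm_num : (0:Int) < 2), h]
  rw [pvTZGo_congr (pvG d) (pvG (d / 2) + 1) (d / 2) hlt (by omega)]
  simp

theorem fGo_eq_f_alt (n : Nat) : ∀ (A B : Int), pvG A + pvG B < n → fGo n A B = f_alt A B := by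
  induction n with
  | zero => intro A B h; omega
  | succ n ih =>
      intro A B h
      rw [fGo, f_alt]
      by_cases hAB : A = B
      · simp [hAB]
      · simp only [hAB, if_false, pv_m2]
        by_cases h2 : A % 2 = 0 ∧ B % 2 = 1
        · have hd : (A - B) % 2 = 1 := by omega
          simp [h2, pvTZ_odd _ hd]
        · simp only [h2, if_false]
          by_cases h3 : A % 2 = 1 ∧ B % 2 = 0
          · have hd : (A - B) % 2 = 1 := by omega
            simp [h3, pvTZ_odd _ hd]
          · simp only [h3, if_false]
            have hp : A % 2 = B % 2 := by omega
            have hd0 : A - B ≠ 0 := by omega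
            have hde : (A - B) % 2 = 0 := by omega
            have hhalf : A / 2 - B / 2 = (A - B) / 2 := by omega
            have hne2 : A / 2 ≠ B / 2 := by omega
            have hgA : pvG (A / 2) ≤ pvG A := by simp only [pvG]; split_ifs <;> omega
            have hgB : pvG (B / 2) ≤ pvG B := by simp only [pvG]; split_ifs <;> omega
            have hdec : pvG (A / 2) + pvG (B / 2) < pvG A + pvG B := by
              simp only [pvG]; split_ifs <;> omega
            rw [pv_d _ _ (by norm_num : (0:Int) < 2), pv_d _ _ (by norm_num : (0:Int) < 2)]
            rw [ih (A / 2) (B / 2) (by omega), f_alt]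
            simp only [hne2, if_false, hhalf,
              pv_d _ _ (by positivity : (0:Int) < 2 ^ pvTZ (A - B)),
              pv_d _ _ (by positivity : (0:Int) < 2 ^ pvTZ ((A - B) / 2))]
            rw [pvTZ_even _ hd0 hde, pow_succ, mul_comm,
              Int.ediv_ediv_of_nonneg (by norm_num), pv_m2]

-- ===== VERDICT (by name: the statement is the Claim_ definition above) =====
theorem f_spec : Claim_equal_f := by
  intro A B _
  unfold Spec_f f
  exact fGo_eq_f_alt (pvG A + pvG B + 1) A B (by omega)
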